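-- pv_equiv track=rewrite | github.com/hemantobora/api-probe | src/api_probe/execution/variables.py | create_execution_contexts
-- ===== SOURCE A (Python) =====
-- from typing import Any, Dict, List
--
-- def create_execution_contexts(env_vars: Dict[str, List[str]]) -> List[Dict[str, str]]:
--     """Create execution contexts with position-based pairing.
--
--     Args:
--         env_vars: Environment variables with multi-value support
--
--     Returns:
--         List of variable dictionaries (one per run)
--     """
--     # Handle empty env vars
--     if not env_vars:
--         return [{}]
--
--     # Find max value count
--     max_count = max(len(values) for values in env_vars.values())
--
--     # Create contexts with position-based pairing
--     contexts = []
--     for i in range(max_count):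
--         context = {}
--         for key, values in env_vars.items():
--             # Use index or last value if out of range
--             value_index = min(i, len(values) - 1)
--             context[key] = values[value_index]
--         contexts.append(context)
--
--     return contexts
-- ===== SOURCE B (Python) =====
-- from typing import Dict, List
--
-- def create_execution_contexts(env_vars: Dict[str, List[str]]) -> List[Dict[str, str]]:
--     """Recursive head/tail decomposition: emit the dict of current heads, then
--     recurse on the tails (keeping a list of length 1 as-is so its last value
--     repeats); no indices and no max_count are ever computed."""
--     if not env_vars:
--         return [{}]
--
--     def go(pairs):
--         if all(len(v) == 0 for _, v in pairs):
--             return []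
--         ctx = {k: v[0] for k, v in pairs}
--         if all(len(v) <= 1 for _, v in pairs):
--             return [ctx]
--         return [ctx] + go([(k, v[1:] if len(v) > 1 else v) for k, v in pairs])
--
--     return go(list(env_vars.items()))
-- ===== Notes on version B (the rewrite author's own statement) =====
-- stated objective: alternative
-- what changed: B replaces A's index arithmetic (range over max_count with a clamped index min(i, len-1) per cell) by a structural recursion that emits the dict of current list heads and recurses on the tails (a length-1 list is kept so its last value repeats); no max_count and no positional indexing at all.
import Mathlib
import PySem

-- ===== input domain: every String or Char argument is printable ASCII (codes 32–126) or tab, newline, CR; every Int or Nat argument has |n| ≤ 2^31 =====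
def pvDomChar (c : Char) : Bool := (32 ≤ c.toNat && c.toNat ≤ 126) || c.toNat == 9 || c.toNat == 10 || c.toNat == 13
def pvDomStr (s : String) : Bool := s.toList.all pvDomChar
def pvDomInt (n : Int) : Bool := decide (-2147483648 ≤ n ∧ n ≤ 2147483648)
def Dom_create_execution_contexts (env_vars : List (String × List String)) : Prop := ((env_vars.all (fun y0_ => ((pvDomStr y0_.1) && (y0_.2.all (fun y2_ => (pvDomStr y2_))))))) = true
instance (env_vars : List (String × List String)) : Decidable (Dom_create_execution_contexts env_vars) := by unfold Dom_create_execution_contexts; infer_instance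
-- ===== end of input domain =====

-- B replaces A's range-over-max_count loop with clamped index min(i, len-1) by a structural
-- recursion: emit the dict of current list heads, then recurse on the tails (a length-1 list
-- is kept as-is so its last value repeats); no max_count and no positional indexing.
-- The dict parameter arrives as an association list; both ports first normalise it with
-- PySem.Dict.ofList (Python's dict collapse: last value wins, first position kept).

-- ===== PORT A =====
def create_execution_contexts (env_vars : List (String × List String)) : List (List (String × String)) :=
  let d : PySem.Dict String (List String) := PySem.Dict.ofList env_vars
  if env_vars = [] then [[]]
  else
    let max_count : Int :=
      (PySem.List.max? (d.values.map (fun values => (values.length : Int))) (fun x => x)).getD 0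
    (PySem.List.pyRange 0 max_count 1).foldl
      (fun contexts i =>
        contexts ++
          [(d.items.foldl
              (fun context kv =>
                context.insert kv.1
                  (PySem.List.pyGetD kv.2 (min i ((kv.2.length : Int) - 1)) ""))
              PySem.Dict.empty).items])
      []

-- ===== PORT B =====
-- helper `go` of Source B: heads then recurse on tails (v[0] is in range whenever Pre_ holds,
-- so pyGetD with default "" is exact there); pvStep is the tail-taking comprehension
def pvStep (pairs : List (String × List String)) : List (String × List String) :=
  pairs.map (fun kv => (kv.1, if 1 < kv.2.length then kv.2.tail else kv.2))

def pvGo (pairs : List (String × List String)) : List (List (String × String)) :=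
  if pairs.all (fun kv => kv.2.length = 0) then []
  else
    let ctx := pairs.map (fun kv => (kv.1, PySem.List.pyGetD kv.2 0 ""))
    if pairs.all (fun kv => kv.2.length ≤ 1) then [ctx]
    else
      ctx :: pvGo (pvStep pairs)
termination_by (pairs.map (fun kv => kv.2.length)).sum
decreasing_by
  simp only [List.all_eq_true, decide_eq_true_eq, not_forall] at *
  rename_i _h1 h2
  obtain ⟨kv, hkv, hlen⟩ := h2
  unfold pvStep
  rw [List.map_map]
  refine List.sum_lt_sum
    ((fun kv : String × List String => kv.2.length) ∘
      (fun kv : String × List String => (kv.1, if 1 < kv.2.length then kv.2.tail else kv.2)))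
    (fun kv : String × List String => kv.2.length) ?_ ⟨kv, hkv, ?_⟩
  · intro a _; simp only [Function.comp]; split <;> simp [List.length_tail]
  · simp only [Function.comp]; rw [if_pos (by omega)]; simp [List.length_tail]; omega

def create_execution_contexts_alt (env_vars : List (String × List String)) : List (List (String × String)) :=
  let d : PySem.Dict String (List String) := PySem.Dict.ofList env_vars
  if env_vars = [] then [[]]
  else pvGo d.items

-- ===== PRECONDITION & SPEC =====
-- Pre_ excludes exactly the inputs on which the Python A raises IndexError (and B does too):
-- after the dict collapse, some variable has an empty value list while another has a nonempty one.
def Pre_create_execution_contexts (env_vars : List (String × List String)) : Prop :=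
  (∀ p ∈ (PySem.Dict.ofList env_vars).items, p.2 ≠ []) ∨
  (∀ p ∈ (PySem.Dict.ofList env_vars).items, p.2 = [])
instance (env_vars : List (String × List String)) : Decidable (Pre_create_execution_contexts env_vars) := by unfold Pre_create_execution_contexts; infer_instance

def pvWitness_create_execution_contexts : (List (String × List String)) :=
  [("A", ["1", "2"]), ("B", ["x"])]

def Spec_create_execution_contexts (env_vars : List (String × List String)) (out : List (List (String × String))) : Prop := out = create_execution_contexts_alt env_vars
instance (env_vars : List (String × List String)) (out : List (List (String × String))) : Decidable (Spec_create_execution_contexts env_vars out) := by unfold Spec_create_execution_contexts; infer_instance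

-- ===== CLAIM (what is proved, stated in full; the proofs are below) =====
def Claim_equal_create_execution_contexts : Prop := ∀ (env_vars : List (String × List String)), Dom_create_execution_contexts env_vars → Pre_create_execution_contexts env_vars → Spec_create_execution_contexts env_vars (create_execution_contexts env_vars)

-- ===== LEMMAS AND PROOFS =====

-- shift of a unit range: range(1, M+1) is range(0, M) moved by one
theorem pv_pyRange_shift (M : Int) :
    PySem.List.pyRange 1 (M + 1) 1 = (PySem.List.pyRange 0 M 1).map (fun i => i + 1) := by
  rw [PySem.List.pyRange_one, PySem.List.pyRange_one, List.map_map]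
  simp only [add_sub_cancel_right, Int.sub_zero]
  apply List.map_congr_left
  intro k _
  simp [Function.comp]
  ring

-- pvGo on lists of maximal length M produces the M clamped-index columns of A
theorem pv_go_eq (M : Nat) :
    ∀ pairs : List (String × List String),
      (∀ kv ∈ pairs, kv.2 ≠ []) →
      (∀ kv ∈ pairs, kv.2.length ≤ M) →
      (∃ kv ∈ pairs, kv.2.length = M) →
      pvGo pairs =
        (PySem.List.pyRange 0 (M : Int) 1).map
          (fun i => pairs.map
            (fun kv => (kv.1, PySem.List.pyGetD kv.2 (min i ((kv.2.length : Int) - 1)) ""))) := by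
  induction M with
  | zero =>
    intro pairs hne _ hex
    obtain ⟨kv, hkv, h0⟩ := hex
    exact absurd (List.eq_nil_of_length_eq_zero h0) (hne kv hkv)
  | succ M ih =>
    intro pairs hne hub hex
    unfold pvGo
    have hnotall : ¬ pairs.all (fun kv => kv.2.length = 0) = true := by
      obtain ⟨kv, hkv, h0⟩ := hex
      simp only [List.all_eq_true, decide_eq_true_eq, not_forall]
      exact ⟨kv, hkv, by omega⟩
    rw [if_neg hnotall]
    by_cases hall1 : pairs.all (fun kv => kv.2.length ≤ 1) = true
    · -- every list has length exactly 1, so M = 0 and one context is produced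
      simp only [List.all_eq_true, decide_eq_true_eq] at hall1
      obtain ⟨kv, hkv, hM⟩ := hex
      have hM0 : M = 0 := by have := hall1 kv hkv; omega
      subst hM0
      rw [if_pos (by simp only [List.all_eq_true, decide_eq_true_eq]; exact hall1)]
      rw [show ((0+1 : Nat) : Int) = 0 + 1 by norm_num, PySem.List.pyRange_one_singleton]
      simp only [List.map_cons, List.map_nil]
      congr 1
      apply List.map_congr_left
      intro a ha
      have h1 : a.2 ≠ [] := hne a ha
      have : min (0:Int) ((a.2.length : Int) - 1) = 0 := by
        have := List.length_pos_iff.mpr h1; omega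
      rw [this]
    · -- some list still has ≥ 2 elements: recurse on the tails
      rw [if_neg hall1]
      have hstepeq : pvStep pairs =
          pairs.map (fun kv => (kv.1, if 1 < kv.2.length then kv.2.tail else kv.2)) := rfl
      rw [hstepeq]
      set step : (String × List String) → (String × List String) :=
        fun kv => (kv.1, if 1 < kv.2.length then kv.2.tail else kv.2) with hstep
      simp only [List.all_eq_true, decide_eq_true_eq, not_forall] at hall1
      obtain ⟨kw, hkw, hkw2⟩ := hall1
      have hM1 : 1 ≤ M := by have := hub kw hkw; omega
      have ihr := ih (pairs.map step)
        (by
          intro kv hkv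
          obtain ⟨a, ha, rfl⟩ := List.mem_map.mp hkv
          have h1 := List.length_pos_iff.mpr (hne a ha)
          by_cases hg : 1 < a.2.length
          · simp only [hstep, hg, if_pos]
            exact List.length_pos_iff.mp (by simp [List.length_tail]; omega)
          · simp only [hstep, hg, if_false]
            exact hne a ha)
        (by
          intro kv hkv
          obtain ⟨a, ha, rfl⟩ := List.mem_map.mp hkv
          have hu := hub a ha
          by_cases hg : 1 < a.2.length
          · simp only [hstep, hg, if_pos]
            simp [List.length_tail]; omega
          · simp only [hstep, hg, if_false]
            omega)
        (by
          obtain ⟨kv, hkv, hM⟩ := hex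
          refine ⟨step kv, List.mem_map_of_mem hkv, ?_⟩
          simp only [hstep]
          rw [if_pos (by omega)]
          simp [List.length_tail]
          omega)
      rw [ihr]
      rw [show ((M+1 : Nat) : Int) = (M : Int) + 1 by push_cast; ring]
      rw [show PySem.List.pyRange 0 ((M:Int)+1) 1 = 0 :: PySem.List.pyRange 1 ((M:Int)+1) 1 from
        PySem.List.pyRange_one_cons (by omega)]
      rw [pv_pyRange_shift, List.map_cons, List.map_map]
      congr 1
      · -- head context: heads = clamped index 0
        apply List.map_congr_left
        intro a ha
        have : min (0:Int) ((a.2.length : Int) - 1) = 0 := by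
          have := List.length_pos_iff.mpr (hne a ha); omega
        rw [this]
      · -- tail contexts: column i of the tails = column i+1 of the originals
        apply List.map_congr_left
        intro i hi
        have hi0 : 0 ≤ i := ((PySem.List.mem_pyRange_one).mp hi).1
        simp only [Function.comp, List.map_map]
        apply List.map_congr_left
        intro a ha
        rw [Function.comp_apply]
        have h1 : a.2 ≠ [] := hne a ha
        have hp : 0 < a.2.length := List.length_pos_iff.mpr h1
        have hga : step a = (a.1, if 1 < a.2.length then a.2.tail else a.2) := rfl
        by_cases hg : 1 < a.2.length
        · rw [hga, if_pos hg]
          show (a.1, PySem.List.pyGetD a.2.tail (min i ((a.2.tail.length : Int) - 1)) "") =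
              (a.1, PySem.List.pyGetD a.2 (min (i + 1) ((a.2.length : Int) - 1)) "")
          have hlt : (a.2.tail.length : Int) = (a.2.length : Int) - 1 := by
            simp [List.length_tail]; omega
          rw [hlt]
          refine congrArg (Prod.mk a.1) ?_
          rw [PySem.List.pyGetD_eq_getElem (h0 := by omega) (h1 := by rw [hlt]; omega)]
          rw [PySem.List.pyGetD_eq_getElem (h0 := by omega) (h1 := by omega)]
          rw [List.getElem_tail]
          congr 1
          omega
        · rw [hga, if_neg hg]
          show (a.1, PySem.List.pyGetD a.2 (min i ((a.2.length : Int) - 1)) "") =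
              (a.1, PySem.List.pyGetD a.2 (min (i + 1) ((a.2.length : Int) - 1)) "")
          have e1 : min i ((a.2.length : Int) - 1) = 0 := by omega
          have e2 : min (i + 1) ((a.2.length : Int) - 1) = 0 := by omega
          rw [e1, e2]

-- the two ports agree on every input satisfying Pre_
theorem pv_ports_eq (env_vars : List (String × List String))
    (hpre : Pre_create_execution_contexts env_vars) :
    create_execution_contexts env_vars = create_execution_contexts_alt env_vars := by
  unfold create_execution_contexts create_execution_contexts_alt
  by_cases h : env_vars = []
  · simp [h]
  · simp only [h, ite_false]
    set d : PySem.Dict String (List String) := PySem.Dict.ofList env_vars with hd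
    -- A's loop nest is the clamped-column comprehension
    rw [PySem.List.foldl_append_singleton_eq_map, List.nil_append]
    have hnodup : (d.items.map Prod.fst).Nodup := by
      have := PySem.Dict.nodup_keys_ofList (ps := env_vars)
      simpa [PySem.Dict.keys] using this
    have hA : ∀ i : Int,
        (d.items.foldl
          (fun context kv =>
            context.insert kv.1
              (PySem.List.pyGetD kv.2 (min i ((kv.2.length : Int) - 1)) ""))
          PySem.Dict.empty).items
        = d.items.map (fun kv => (kv.1, PySem.List.pyGetD kv.2 (min i ((kv.2.length : Int) - 1)) "")) := by
      intro i
      rw [PySem.Dict.items_foldl_insert_fresh d.items Prod.fst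
        (fun kv => PySem.List.pyGetD kv.2 (min i ((kv.2.length : Int) - 1)) "")
        PySem.Dict.empty (fun a _ => PySem.Dict.contains_empty a.1) hnodup]
      simp [PySem.Dict.empty]
    by_cases hnil : d.items = []
    · -- (unreachable for a nonempty input, but both sides are [] anyway)
      simp [hnil, PySem.Dict.values, PySem.List.pyRange]
      unfold pvGo
      simp [PySem.List.max?]
    · rcases hpre with hpos | hzero
      · -- all value lists nonempty: use pv_go_eq at M = the maximum length
        have hmemlen : ∀ kv ∈ d.items, ((kv.2.length : Int)) ∈
            d.values.map (fun values => (values.length : Int)) := by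
          intro kv hkv
          exact List.mem_map_of_mem (List.mem_map_of_mem hkv)
        obtain ⟨kv0, hkv0⟩ := List.exists_mem_of_ne_nil d.items hnil
        obtain ⟨m, hm⟩ : ∃ m, PySem.List.max? (d.values.map (fun values => (values.length : Int))) (fun x => x) = some m := by
          cases hmx : PySem.List.max? (d.values.map (fun values => (values.length : Int))) (fun x => x) with
          | none =>
            exact absurd ((PySem.List.max?_eq_none_iff _ _).mp hmx)
              (List.ne_nil_of_mem (hmemlen kv0 hkv0))
          | some m => exact ⟨m, rfl⟩
        have hmmem := PySem.List.max?_mem hm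
        obtain ⟨v, hv, rfl⟩ : ∃ v ∈ d.values, ((v.length : Int)) = m := by
          obtain ⟨v, hv, hvm⟩ := List.mem_map.mp hmmem
          exact ⟨v, hv, hvm⟩
        obtain ⟨kvm, hkvm, hkvm2⟩ : ∃ kv ∈ d.items, kv.2 = v := by
          obtain ⟨kv, hkv, h2⟩ := List.mem_map.mp hv
          exact ⟨kv, hkv, h2⟩
        have hub : ∀ kv ∈ d.items, kv.2.length ≤ v.length := by
          intro kv hkv
          have := PySem.List.max?_isMax hm _ (hmemlen kv hkv)
          simpa using this
        rw [pv_go_eq v.length d.items hpos hub ⟨kvm, hkvm, by rw [hkvm2]⟩]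
        simp only [hm, Option.getD_some]
        apply List.map_congr_left
        intro i _
        exact hA i
      · -- all value lists empty: both sides return []
        have hvals : ∀ x ∈ d.values.map (fun values => (values.length : Int)), x = 0 := by
          intro x hx
          obtain ⟨v, hv, rfl⟩ := List.mem_map.mp hx
          obtain ⟨kv, hkv, rfl⟩ := List.mem_map.mp hv
          simp [hzero kv hkv]
        obtain ⟨kv0, hkv0⟩ := List.exists_mem_of_ne_nil d.items hnil
        obtain ⟨m, hm⟩ : ∃ m, PySem.List.max? (d.values.map (fun values => (values.length : Int))) (fun x => x) = some m := by
          cases hmx : PySem.List.max? (d.values.map (fun values => (values.length : Int))) (fun x => x) with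
          | none =>
            exact absurd ((PySem.List.max?_eq_none_iff _ _).mp hmx)
              (List.ne_nil_of_mem (List.mem_map_of_mem (List.mem_map_of_mem hkv0)))
          | some m => exact ⟨m, rfl⟩
        have hm0 : m = 0 := hvals m (PySem.List.max?_mem hm)
        unfold pvGo
        rw [if_pos (by
          simp only [List.all_eq_true, decide_eq_true_eq]
          intro kv hkv; simp [hzero kv hkv])]
        simp [hm, hm0, PySem.List.pyRange_one_eq_nil (by omega : (0:Int) ≤ 0)]

-- ===== VERDICT (by name: the statement is the Claim_ definition above) =====
theorem create_execution_contexts_spec : Claim_equal_create_execution_contexts := by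
  intro env_vars _ hpre
  exact pv_ports_eq env_vars hpre
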